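-- pv_equiv track=rewrite | github.com/appliedstate/liftoff | scripts/bootstrap_local_meeting_db.py | _next_nonempty_line
-- ===== SOURCE A (Python) =====
-- from typing import Dict, List, Optional, Tuple
--
-- def _next_nonempty_line(lines: List[str], current_line: str) -> Optional[str]:
--     found = False
--     for line in lines:
--         if not found:
--             if line == current_line:
--                 found = True
--             continue
--         if line.strip():
--             return line
--     return None
-- ===== SOURCE B (Python) =====
-- from typing import Dict, List, Optional, Tuple
--
-- def _next_nonempty_line(lines: List[str], current_line: str) -> Optional[str]:
--     nxt = None   # nearest nonempty line strictly after the position being visited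
--     ans = None
--     for line in reversed(lines):
--         if line == current_line:
--             ans = nxt
--         if line.strip():
--             nxt = line
--     return ans
-- ===== Notes on version B (the rewrite author's own statement) =====
-- stated objective: alternative
-- what changed: Replaces A's forward flag-driven scan with a single reverse pass carrying two accumulators: the nearest following nonempty line, recorded as the answer whenever the anchor line is seen (the last recording corresponds to the first occurrence).
import Mathlib
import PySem

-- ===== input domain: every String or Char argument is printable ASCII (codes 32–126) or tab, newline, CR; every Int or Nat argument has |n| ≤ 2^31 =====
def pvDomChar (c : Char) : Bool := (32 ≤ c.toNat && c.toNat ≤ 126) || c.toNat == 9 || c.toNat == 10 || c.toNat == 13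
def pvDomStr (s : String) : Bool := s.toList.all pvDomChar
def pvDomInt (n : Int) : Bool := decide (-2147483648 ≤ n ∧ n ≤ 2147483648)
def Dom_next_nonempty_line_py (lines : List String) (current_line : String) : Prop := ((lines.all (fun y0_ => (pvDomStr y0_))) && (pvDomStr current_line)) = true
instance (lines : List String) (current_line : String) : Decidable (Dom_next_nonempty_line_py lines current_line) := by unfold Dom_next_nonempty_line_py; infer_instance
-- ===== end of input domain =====

-- B replaces A's forward flag-driven scan with a single reverse pass carrying two accumulators
-- (nearest following nonempty line; answer recorded at each anchor sighting): an alternative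
-- algorithm of the same cost.


-- ===== PORT A =====
-- A's loop over `lines` with the boolean `found` flag, transcribed as structural recursion
-- carrying the flag.
def nextNonemptyGoA (current_line : String) (found : Bool) : List String → Option String
  | [] => none
  | line :: rest =>
      if !found then
        (if line == current_line then nextNonemptyGoA current_line true rest
         else nextNonemptyGoA current_line false rest)
      else
        if PySem.Str.strip line ≠ "" then some line
        else nextNonemptyGoA current_line found rest

def next_nonempty_line_py (lines : List String) (current_line : String) : Option String :=
  nextNonemptyGoA current_line false lines

-- ===== PORT B =====
-- Source B's loop body: state (nxt, ans); on a match record nxt as ans, then if nonempty update nxt.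
def nextNonemptyStepB (current_line : String) (st : Option String × Option String)
    (line : String) : Option String × Option String :=
  let ans := if line == current_line then st.1 else st.2
  let nxt := if PySem.Str.strip line ≠ "" then some line else st.1
  (nxt, ans)

-- Source B: fold the step over reversed(lines), return ans.
def next_nonempty_line_py_alt (lines : List String) (current_line : String) : Option String :=
  (lines.reverse.foldl (nextNonemptyStepB current_line) (none, none)).2

-- ===== PRECONDITION & SPEC =====
def Spec_next_nonempty_line_py (lines : List String) (current_line : String) (out : Option String) : Prop := out = next_nonempty_line_py_alt lines current_line
instance (lines : List String) (current_line : String) (out : Option String) : Decidable (Spec_next_nonempty_line_py lines current_line out) := by unfold Spec_next_nonempty_line_py; infer_instance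

-- ===== CLAIM (what is proved, stated in full; the proofs are below) =====
def Claim_equal_next_nonempty_line_py : Prop := ∀ (lines : List String) (current_line : String), Dom_next_nonempty_line_py lines current_line → Spec_next_nonempty_line_py lines current_line (next_nonempty_line_py lines current_line)

-- ===== LEMMAS AND PROOFS =====

-- First nonempty line of a list (what A's found=true phase returns, and what B's nxt accumulator tracks).
def firstNonempty : List String → Option String
  | [] => none
  | line :: rest => if PySem.Str.strip line ≠ "" then some line else firstNonempty rest

theorem goA_true_eq_first (c : String) (xs : List String) :
    nextNonemptyGoA c true xs = firstNonempty xs := by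
  induction xs with
  | nil => rfl
  | cons x rest ih => simp [nextNonemptyGoA, firstNonempty, ih]

-- Joint invariant of B's reverse fold: the nxt component is the first nonempty line of the
-- suffix processed so far, and the ans component is A's answer on that suffix.
theorem foldB_invariant (c : String) (xs : List String) :
    xs.foldr (fun line st => nextNonemptyStepB c st line) (none, none)
      = (firstNonempty xs, nextNonemptyGoA c false xs) := by
  induction xs with
  | nil => rfl
  | cons x rest ih =>
    rw [List.foldr_cons, ih]
    simp only [nextNonemptyStepB, nextNonemptyGoA, firstNonempty, goA_true_eq_first]
    by_cases hx : x = c <;> by_cases hs : PySem.Str.strip x ≠ "" <;> simp [hx, hs]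

theorem next_nonempty_eq (lines : List String) (c : String) :
    next_nonempty_line_py lines c = next_nonempty_line_py_alt lines c := by
  unfold next_nonempty_line_py next_nonempty_line_py_alt
  rw [List.foldl_reverse, foldB_invariant]

-- ===== VERDICT (by name: the statement is the Claim_ definition above) =====
theorem next_nonempty_line_py_spec : Claim_equal_next_nonempty_line_py := by
  intro lines c _
  exact next_nonempty_eq lines c
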